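-- pv_equiv track=rewrite | github.com/Amimer12/TP1-SSAD | django_Projet/appTP1/views.py | extraire_message_colonne
-- ===== SOURCE A (Python) =====
-- import math
--
-- def extraire_message_colonne(text_cache, nb_colonnes):
--     message_extrait = ""
--     mots = text_cache.split()
--     # Calculer le nombre de lignes nécessaires
--     nb_lignes = math.ceil(len(mots) / nb_colonnes)
--     # Reconstruire la matrice
--     tableau = text_to_tab(mots, nb_colonnes, nb_lignes)
--
--     for j in range(nb_colonnes):
--         for i in range(nb_lignes):
--             if tableau[i][j]:  # Vérifier si la cellule contient un mot
--                 # Récupérer la première lettre de chaque mot de la colonne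
--                 message_extrait += tableau[i][j][0]
--     return message_extrait
--
-- def text_to_tab(mots, nb_colonnes, nb_lignes):
--      # Construire la matrice
--     tableau = [["" for _ in range(nb_colonnes)] for _ in range(nb_lignes)]
--     index = 0
--     for i in range(nb_lignes):
--         for j in range(nb_colonnes):
--             if index < len(mots):
--                 tableau[i][j] = mots[index]
--                 index += 1
--     return tableau
-- ===== SOURCE B (Python) =====
-- def extraire_message_colonne(text_cache, nb_colonnes):
--     mots = text_cache.split()
--     # ceil(len(mots)/nb_colonnes) as integer ceiling division (ZeroDivisionError for nb_colonnes == 0, like A)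
--     nb_lignes = -(-len(mots) // nb_colonnes)
--     lettres = []
--     for j in range(nb_colonnes):
--         for i in range(nb_lignes):
--             index = i * nb_colonnes + j
--             if index < len(mots):
--                 lettres.append(mots[index][0])
--     return "".join(lettres)
-- ===== Notes on version B (the rewrite author's own statement) =====
-- stated objective: simpler
-- what changed: B drops the padded 2D matrix entirely: it computes the column-major position index = i*nb_colonnes + j arithmetically, collects first letters in a list and joins it, instead of materialising the matrix row-major and re-reading it column-wise with string concatenation.
import Mathlib
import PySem

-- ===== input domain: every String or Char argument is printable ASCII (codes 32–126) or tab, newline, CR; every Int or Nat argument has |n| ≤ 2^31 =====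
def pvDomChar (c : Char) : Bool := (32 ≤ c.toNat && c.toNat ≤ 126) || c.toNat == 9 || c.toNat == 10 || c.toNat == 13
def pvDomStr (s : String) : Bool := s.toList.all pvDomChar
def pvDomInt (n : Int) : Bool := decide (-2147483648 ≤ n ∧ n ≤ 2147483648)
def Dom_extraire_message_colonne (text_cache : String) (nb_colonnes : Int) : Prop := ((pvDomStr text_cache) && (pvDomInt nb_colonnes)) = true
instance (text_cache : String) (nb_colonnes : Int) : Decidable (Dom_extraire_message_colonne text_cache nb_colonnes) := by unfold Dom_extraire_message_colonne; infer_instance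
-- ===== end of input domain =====

-- B drops A's padded 2D matrix: it reads column-major positions arithmetically (index = i*cols + j)
-- and joins collected first letters (objective: simpler).


-- ===== PORT A =====
-- one pass of the inner `for j in range(nb_colonnes)` of text_to_tab: the cell gets mots[index]
-- (and index advances) while index < len(mots), otherwise it keeps its initial ""
def pvRowStep (mots : List String) : List String × Int → Int → List String × Int :=
  fun rs _j =>
    if rs.2 < (mots.length : Int)
    then (rs.1 ++ [PySem.List.pyGetD mots rs.2 ""], rs.2 + 1)
    else (rs.1 ++ [""], rs.2)

-- one pass of the outer `for i in range(nb_lignes)` of text_to_tab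
def pvTabStep (mots : List String) (nbC : Int) : List (List String) × Int → Int → List (List String) × Int :=
  fun st _i =>
    let r := (PySem.List.pyRange 0 nbC 1).foldl (pvRowStep mots) ([], st.2)
    (st.1 ++ [r.1], r.2)

-- text_to_tab: the pre-filled matrix of "" overwritten cell by cell in order = building each row left to right
def text_to_tab (mots : List String) (nbC nbL : Int) : List (List String) :=
  ((PySem.List.pyRange 0 nbL 1).foldl (pvTabStep mots nbC) ([], 0)).1

def extraire_message_colonne (text_cache : String) (nb_colonnes : Int) : String :=
  let mots := PySem.Str.split₀ text_cache
  -- math.ceil(len(mots) / nb_colonnes): exact as ceiling division -((-len) // nb) on this domain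
  let nbL : Int := -(PySem.Int.floordiv (-(mots.length : Int)) nb_colonnes)
  let tableau := text_to_tab mots nb_colonnes nbL
  -- message_extrait += tableau[i][j][0] when the cell is truthy (nonempty); the indices are always in range
  String.ofList ((PySem.List.pyRange 0 nb_colonnes 1).foldl (fun acc j =>
    (PySem.List.pyRange 0 nbL 1).foldl (fun acc2 i =>
      let cell := (PySem.List.pyGetD (PySem.List.pyGetD tableau i []) j "").toList
      if cell = [] then acc2 else acc2 ++ [cell.headD ' ']) acc) [])

-- ===== PORT B =====
def extraire_message_colonne_alt (text_cache : String) (nb_colonnes : Int) : String :=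
  let mots := PySem.Str.split₀ text_cache
  let n : Int := mots.length
  -- nb_lignes = -(-len(mots) // nb_colonnes)
  let nbL : Int := -(PySem.Int.floordiv (-n) nb_colonnes)
  -- lettres.append(mots[index][0]) collects one character per hit; "".join(lettres) is that character sequence
  String.ofList ((PySem.List.pyRange 0 nb_colonnes 1).foldl (fun acc j =>
    (PySem.List.pyRange 0 nbL 1).foldl (fun acc2 i =>
      if i * nb_colonnes + j < n
      then acc2 ++ [(PySem.List.pyGetD mots (i * nb_colonnes + j) "").toList.headD ' ']
      else acc2) acc) [])

-- ===== PRECONDITION & SPEC =====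
-- A (and B) raise ZeroDivisionError when nb_colonnes == 0; Pre_ excludes exactly that.
def Pre_extraire_message_colonne (text_cache : String) (nb_colonnes : Int) : Prop := nb_colonnes ≠ 0
instance (text_cache : String) (nb_colonnes : Int) : Decidable (Pre_extraire_message_colonne text_cache nb_colonnes) := by unfold Pre_extraire_message_colonne; infer_instance
def pvWitness_extraire_message_colonne : String × Int := ("hello wide open road today", 2)

def Spec_extraire_message_colonne (text_cache : String) (nb_colonnes : Int) (out : String) : Prop := out = extraire_message_colonne_alt text_cache nb_colonnes
instance (text_cache : String) (nb_colonnes : Int) (out : String) : Decidable (Spec_extraire_message_colonne text_cache nb_colonnes out) := by unfold Spec_extraire_message_colonne; infer_instance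

-- ===== CLAIM (what is proved, stated in full; the proofs are below) =====
def Claim_equal_extraire_message_colonne : Prop := ∀ (text_cache : String) (nb_colonnes : Int), Dom_extraire_message_colonne text_cache nb_colonnes → Pre_extraire_message_colonne text_cache nb_colonnes → Spec_extraire_message_colonne text_cache nb_colonnes (extraire_message_colonne text_cache nb_colonnes)

-- ===== LEMMAS AND PROOFS =====

-- every word produced by str.split() is nonempty (invariant of split₀.go: only nonempty chunks are emitted)
theorem pv_split₀_go_ne_nil (s : List Char) : ∀ (cur : List Char) (acc : List (List Char)),
    (∀ w ∈ acc, w ≠ []) → ∀ w ∈ PySem.Chars.split₀.go s cur acc, w ≠ [] := by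
  induction s with
  | nil =>
    intro cur acc hacc w hw
    simp only [PySem.Chars.split₀.go] at hw
    by_cases hcur : cur.isEmpty = true
    · rw [if_pos hcur] at hw
      exact hacc w (List.mem_reverse.mp hw)
    · rw [if_neg hcur] at hw
      rcases List.mem_cons.mp (List.mem_reverse.mp hw) with h | h
      · subst h
        simp only [ne_eq, List.reverse_eq_nil_iff]
        simpa using hcur
      · exact hacc w h
  | cons c rest ih =>
    intro cur acc hacc w hw
    simp only [PySem.Chars.split₀.go] at hw
    split at hw
    · by_cases hcur : cur.isEmpty = true
      · rw [if_pos hcur] at hw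
        exact ih [] acc hacc w hw
      · rw [if_neg hcur] at hw
        refine ih [] (cur.reverse :: acc) ?_ w hw
        intro v hv
        rcases List.mem_cons.mp hv with h | h
        · subst h
          simp only [ne_eq, List.reverse_eq_nil_iff]
          simpa using hcur
        · exact hacc v h
    · exact ih (c :: cur) acc hacc w hw

theorem pv_word_ne_nil (t : String) (w : String) (hw : w ∈ PySem.Str.split₀ t) : w.toList ≠ [] := by
  have : w.toList ∈ PySem.Chars.split₀ t.toList := by
    rw [← PySem.Str.split₀_map_toList]
    exact List.mem_map_of_mem hw
  exact pv_split₀_go_ne_nil t.toList [] [] (by simp) w.toList this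

-- the cell the matrix holds at row i, column j
def pvCell (mots : List String) (k : Nat) (i j : Nat) : String :=
  if ((i * k + j : Nat) : Int) < (mots.length : Int) then PySem.List.pyGetD mots ((i * k + j : Nat) : Int) "" else ""

def pvRowOf (mots : List String) (k : Nat) (i : Nat) : List String :=
  (List.range k).map (pvCell mots k i)

-- the inner row fold, characterised: it appends the next min(k, n-idx) words padded with ""
theorem pv_row (mots : List String) (m : Nat) :
    ∀ (row : List String) (idx : Int), 0 ≤ idx → idx ≤ (mots.length : Int) →
    (List.range m).foldl (fun rs (_ : Nat) => pvRowStep mots rs 0) (row, idx)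
    = (row ++ (List.range m).map (fun (j : Nat) => if idx + (j : Int) < (mots.length : Int) then PySem.List.pyGetD mots (idx + (j : Int)) "" else ""),
       min (idx + m) (mots.length : Int)) := by
  induction m with
  | zero => intro row idx h0 h1; simp; omega
  | succ m ih =>
    intro row idx h0 h1
    rw [List.range_succ, List.foldl_append, ih row idx h0 h1]
    simp only [List.foldl_cons, List.foldl_nil, pvRowStep, List.map_append, List.map_cons, List.map_nil]
    by_cases hc : idx + (m : Int) < (mots.length : Int)
    · have hm : min (idx + (m : Int)) (mots.length : Int) = idx + m := by omega
      rw [hm, if_pos hc, if_pos hc, Prod.mk.injEq]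
      refine ⟨by rw [List.append_assoc], by push_cast; omega⟩
    · have hm : min (idx + (m : Int)) (mots.length : Int) = (mots.length : Int) := by omega
      have h2 : ¬ ((mots.length : Int) < (mots.length : Int)) := by omega
      rw [hm, if_neg h2, if_neg hc, Prod.mk.injEq]
      refine ⟨by rw [List.append_assoc], by push_cast; omega⟩

-- a foldl over range(0, m) whose step ignores the loop variable, moved to List.range
theorem pv_pyRange_fold {β : Type} (g : β → Int → β) (hg : ∀ b x y, g b x = g b y) (m : Int) (init : β) :
    (PySem.List.pyRange 0 m 1).foldl g init = (List.range m.toNat).foldl (fun b (_ : Nat) => g b 0) init := by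
  rw [PySem.List.pyRange_one, List.foldl_map]
  have : m - 0 = m := by omega
  rw [this]
  congr 1
  funext b a
  exact hg b _ _

-- the outer matrix fold, characterised
theorem pv_tab (mots : List String) (nbC : Int) (r : Nat) :
    ∀ (rows : List (List String)) (i0 : Nat),
    (List.range r).foldl (fun st (_ : Nat) => pvTabStep mots nbC st 0) (rows, min ((i0 * nbC.toNat : Nat) : Int) (mots.length : Int))
    = (rows ++ (List.range r).map (fun t => pvRowOf mots nbC.toNat (i0 + t)),
       min ((((i0 + r) * nbC.toNat : Nat)) : Int) (mots.length : Int)) := by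
  induction r with
  | zero => intro rows i0; simp
  | succ r ih =>
    intro rows i0
    rw [List.range_succ, List.foldl_append, ih rows i0]
    simp only [List.foldl_cons, List.foldl_nil, pvTabStep]
    rw [pv_pyRange_fold (pvRowStep mots) (fun b x y => rfl) nbC]
    rw [pv_row mots nbC.toNat _ (min ((((i0 + r) * nbC.toNat : Nat)) : Int) (mots.length : Int))
        (by positivity) (by omega)]
    rw [Prod.mk.injEq]
    constructor
    · rw [List.map_append, List.map_cons, List.map_nil, ← List.append_assoc]
      congr 1
      congr 1
      simp only [List.nil_append]
      unfold pvRowOf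
      apply List.map_congr_left
      intro j hj
      unfold pvCell
      by_cases hbig : (((i0 + r) * nbC.toNat : Nat) : Int) ≤ (mots.length : Int)
      · have hidx : min ((((i0 + r) * nbC.toNat : Nat)) : Int) (mots.length : Int) = (((i0 + r) * nbC.toNat : Nat) : Int) := by omega
        rw [hidx]
        have hcast : (((i0 + r) * nbC.toNat : Nat) : Int) + (j : Int) = (((i0 + r) * nbC.toNat + j : Nat) : Int) := by push_cast; ring
        rw [hcast]
      · have hidx : min ((((i0 + r) * nbC.toNat : Nat)) : Int) (mots.length : Int) = (mots.length : Int) := by omega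
        rw [hidx]
        have h1 : ¬ ((mots.length : Int) + (j : Int) < (mots.length : Int)) := by omega
        have h2 : ¬ ((((i0 + r) * nbC.toNat + j : Nat) : Int) < (mots.length : Int)) := by push_cast at hbig ⊢; omega
        rw [if_neg h1, if_neg h2]
    · push_cast
      have hmul : ((i0 : Int) + ((r : Int) + 1)) * (nbC.toNat : Int) = ((i0 : Int) + (r : Int)) * (nbC.toNat : Int) + (nbC.toNat : Int) := by ring
      rw [hmul]
      generalize ((i0 : Int) + (r : Int)) * (nbC.toNat : Int) = a
      omega

theorem pv_text_to_tab (mots : List String) (nbC nbL : Int) :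
    text_to_tab mots nbC nbL = (List.range nbL.toNat).map (pvRowOf mots nbC.toNat) := by
  unfold text_to_tab
  rw [pv_pyRange_fold (pvTabStep mots nbC) (fun b x y => rfl) nbL]
  have h := pv_tab mots nbC nbL.toNat [] 0
  rw [show min (((0 * nbC.toNat : Nat)) : Int) (mots.length : Int) = 0 from by simp] at h
  rw [h]
  simp

theorem extraire_message_colonne_spec : Claim_equal_extraire_message_colonne := by
  intro text_cache nb_colonnes _hdom _hpre
  unfold Spec_extraire_message_colonne
  unfold extraire_message_colonne extraire_message_colonne_alt
  dsimp only
  congr 1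
  apply PySem.List.foldl_congr_mem
  intro acc j hj
  apply PySem.List.foldl_congr_mem
  intro acc2 i hi
  rcases PySem.List.mem_pyRange_one.mp hj with ⟨hj0, hjC⟩
  rcases PySem.List.mem_pyRange_one.mp hi with ⟨hi0, hiL⟩
  set mots := PySem.Str.split₀ text_cache with hmots
  set nbL : Int := -(PySem.Int.floordiv (-(mots.length : Int)) nb_colonnes) with hnbL
  rw [pv_text_to_tab]
  have hC0 : 0 < nb_colonnes := lt_of_le_of_lt hj0 hjC
  have hilen : i < ((((List.range nbL.toNat).map (pvRowOf mots nb_colonnes.toNat)).length : Nat) : Int) := by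
    simp only [List.length_map, List.length_range]; omega
  rw [PySem.List.pyGetD_eq_getElem _ _ hi0 hilen]
  rw [List.getElem_map, List.getElem_range]
  have hjlen : j < (((pvRowOf mots nb_colonnes.toNat i.toNat).length : Nat) : Int) := by
    simp only [pvRowOf, List.length_map, List.length_range]; omega
  rw [PySem.List.pyGetD_eq_getElem _ _ hj0 hjlen]
  simp only [pvRowOf, List.getElem_map, List.getElem_range]
  unfold pvCell
  have hidx : ((i.toNat * nb_colonnes.toNat + j.toNat : Nat) : Int) = i * nb_colonnes + j := by
    push_cast [Int.toNat_of_nonneg hi0, Int.toNat_of_nonneg hj0, Int.toNat_of_nonneg (le_of_lt hC0)]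
    ring
  rw [hidx]
  by_cases hcond : i * nb_colonnes + j < (mots.length : Int)
  · have hnn : 0 ≤ i * nb_colonnes + j := by
      have := mul_nonneg hi0 (le_of_lt hC0); omega
    have hmem : PySem.List.pyGetD mots (i * nb_colonnes + j) "" ∈ mots := by
      apply PySem.List.pyGetD_mem
      simp only [PySem.Raise.InRange]
      omega
    have hne : (PySem.List.pyGetD mots (i * nb_colonnes + j) "").toList ≠ [] :=
      pv_word_ne_nil text_cache _ hmem
    rw [if_pos hcond, if_pos hcond, if_neg hne]
  · rw [if_neg hcond, if_neg hcond]
    have : ("" : String).toList = [] := rfl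
    rw [this, if_pos rfl]
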